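-- pv_equiv track=rewrite | github.com/mikaylathompson/advent2022 | days/day12.py | parse_part2
-- ===== SOURCE A (Python) =====
-- def parse_part2(inpt):
--     grid = []
--     starts = []
--     end = (0,0)
--     for r, line in enumerate(inpt):
--         row = []
--         for c, char in enumerate(line):
--             if char == 'S':
--                 starts.append((r, c))
--                 row.append(1)
--                 continue
--             elif char == 'E':
--                 end = (r, c)
--                 row.append(26)
--                 continue
--             if char == 'a':
--                 starts.append((r, c))
--             row.append(ord(char) - 96)
--         grid.append(row)
--     return grid, starts, end
-- ===== SOURCE B (Python) =====
-- def parse_part2(inpt):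
--     lines = list(inpt)
--     grid = [[1 if ch == 'S' else 26 if ch == 'E' else ord(ch) - 96 for ch in line]
--             for line in lines]
--     starts = [(r, c) for r, line in enumerate(lines)
--               for c, ch in enumerate(line) if ch == 'S' or ch == 'a']
--     ends = [(r, c) for r, line in enumerate(lines)
--             for c, ch in enumerate(line) if ch == 'E']
--     end = ends[-1] if ends else (0, 0)
--     return grid, starts, end
-- ===== Notes on version B (the rewrite author's own statement) =====
-- stated objective: simpler
-- what changed: Replaces the single stateful nested loop that interleaves grid-building, start-collecting and end-overwriting with three independent comprehensions (height map, start filter, last-'E' lookup).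
import Mathlib
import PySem

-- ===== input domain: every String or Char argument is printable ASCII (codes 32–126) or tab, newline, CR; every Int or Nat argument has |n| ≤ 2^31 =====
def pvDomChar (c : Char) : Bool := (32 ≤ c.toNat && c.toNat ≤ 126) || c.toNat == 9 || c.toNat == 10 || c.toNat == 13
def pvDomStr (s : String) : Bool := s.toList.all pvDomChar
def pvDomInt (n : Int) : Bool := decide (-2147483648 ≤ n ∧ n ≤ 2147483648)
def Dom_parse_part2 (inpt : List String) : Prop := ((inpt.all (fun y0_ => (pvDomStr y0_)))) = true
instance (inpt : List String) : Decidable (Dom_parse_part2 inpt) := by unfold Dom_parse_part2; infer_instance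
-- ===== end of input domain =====

-- B replaces A's single stateful nested loop by three independent comprehensions (simpler decomposition, same cost).

-- ===== PORT A =====
-- literal transliteration of A's nested enumerate loops with mutable (grid, starts, end) state
def parse_part2 (inpt : List String) : List (List Int) × (List (Int × Int)) × (Int × Int) :=
  (PySem.List.enumerate inpt).foldl
    (fun (st : List (List Int) × List (Int × Int) × (Int × Int)) rl =>
      let r := rl.1
      let inner := (PySem.List.enumerate rl.2.toList).foldl
        (fun (st2 : List Int × List (Int × Int) × (Int × Int)) cc =>
          let c := cc.1
          let ch := cc.2
          if ch = 'S' then (st2.1 ++ [(1 : Int)], st2.2.1 ++ [(r, c)], st2.2.2)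
          else if ch = 'E' then (st2.1 ++ [(26 : Int)], st2.2.1, (r, c))
          else if ch = 'a' then (st2.1 ++ [(ch.toNat : Int) - 96], st2.2.1 ++ [(r, c)], st2.2.2)
          else (st2.1 ++ [(ch.toNat : Int) - 96], st2.2.1, st2.2.2))
        ([], st.2.1, st.2.2)
      (st.1 ++ [inner.1], inner.2.1, inner.2.2))
    ([], [], ((0 : Int), (0 : Int)))

-- ===== PORT B =====
def pvHeight (ch : Char) : Int :=
  if ch = 'S' then 1 else if ch = 'E' then 26 else (ch.toNat : Int) - 96

def parse_part2_alt (inpt : List String) : List (List Int) × (List (Int × Int)) × (Int × Int) :=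
  let lines := inpt
  let grid := lines.map (fun line => line.toList.map pvHeight)
  let starts := (PySem.List.enumerate lines).flatMap (fun rl =>
    ((PySem.List.enumerate rl.2.toList).filter (fun cc => cc.2 == 'S' || cc.2 == 'a')).map
      (fun cc => (rl.1, cc.1)))
  let ends := (PySem.List.enumerate lines).flatMap (fun rl =>
    ((PySem.List.enumerate rl.2.toList).filter (fun cc => cc.2 == 'E')).map
      (fun cc => (rl.1, cc.1)))
  (grid, starts, ends.getLast?.getD ((0 : Int), (0 : Int)))

-- ===== PRECONDITION & SPEC =====
def Spec_parse_part2 (inpt : List String) (out : List (List Int) × (List (Int × Int)) × (Int × Int)) : Prop := out = parse_part2_alt inpt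
instance (inpt : List String) (out : List (List Int) × (List (Int × Int)) × (Int × Int)) : Decidable (Spec_parse_part2 inpt out) := by unfold Spec_parse_part2; infer_instance

-- ===== CLAIM (what is proved, stated in full; the proofs are below) =====
def Claim_equal_parse_part2 : Prop := ∀ (inpt : List String), Dom_parse_part2 inpt → Spec_parse_part2 inpt (parse_part2 inpt)

-- ===== LEMMAS AND PROOFS =====

-- "the last element overwrites": folding with fun _ p => p is getLast?.getD
theorem foldl_last {α : Type} (l : List α) (e : α) :
    l.foldl (fun _ p => p) e = l.getLast?.getD e := by
  induction l generalizing e with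
  | nil => rfl
  | cons x xs ih =>
    rw [List.foldl_cons, ih]
    cases xs with
    | nil => rfl
    | cons y ys =>
      rw [List.getLast?_cons_cons]
      cases h : (y :: ys).getLast? with
      | none => simp [List.getLast?_eq_none_iff] at h
      | some z => rfl

-- inner loop of A, with generalized enumerate start and accumulators
theorem inner_eq (r : Int) (chars : List Char) (c : Int) (row : List Int)
    (s : List (Int × Int)) (e : Int × Int) :
    (PySem.List.enumerate chars c).foldl
      (fun (st2 : List Int × List (Int × Int) × (Int × Int)) cc =>
        let ci := cc.1
        let ch := cc.2
        if ch = 'S' then (st2.1 ++ [(1 : Int)], st2.2.1 ++ [(r, ci)], st2.2.2)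
        else if ch = 'E' then (st2.1 ++ [(26 : Int)], st2.2.1, (r, ci))
        else if ch = 'a' then (st2.1 ++ [(ch.toNat : Int) - 96], st2.2.1 ++ [(r, ci)], st2.2.2)
        else (st2.1 ++ [(ch.toNat : Int) - 96], st2.2.1, st2.2.2))
      (row, s, e)
    = (row ++ chars.map pvHeight,
       s ++ ((PySem.List.enumerate chars c).filter (fun cc => cc.2 == 'S' || cc.2 == 'a')).map
              (fun cc => (r, cc.1)),
       (((PySem.List.enumerate chars c).filter (fun cc => cc.2 == 'E')).map
              (fun cc => (r, cc.1))).foldl (fun _ p => p) e) := by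
  induction chars generalizing c row s e with
  | nil => simp [PySem.List.enumerate_nil]
  | cons ch chs ih =>
    rw [PySem.List.enumerate_cons]
    by_cases hS : ch = 'S'
    · simp [List.foldl_cons, hS, ih, pvHeight]
    · by_cases hE : ch = 'E'
      · simp [List.foldl_cons, hS, hE, ih, pvHeight]
      · by_cases hA : ch = 'a'
        · simp [List.foldl_cons, hS, hE, hA, ih, pvHeight]
        · simp [List.foldl_cons, hS, hE, hA, ih, pvHeight]

-- outer loop of A, with generalized enumerate start and accumulators
theorem outer_eq (lines : List String) (r : Int) (g : List (List Int))
    (s : List (Int × Int)) (e : Int × Int) :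
    (PySem.List.enumerate lines r).foldl
      (fun (st : List (List Int) × List (Int × Int) × (Int × Int)) rl =>
        let ri := rl.1
        let inner := (PySem.List.enumerate rl.2.toList).foldl
          (fun (st2 : List Int × List (Int × Int) × (Int × Int)) cc =>
            let c := cc.1
            let ch := cc.2
            if ch = 'S' then (st2.1 ++ [(1 : Int)], st2.2.1 ++ [(ri, c)], st2.2.2)
            else if ch = 'E' then (st2.1 ++ [(26 : Int)], st2.2.1, (ri, c))
            else if ch = 'a' then (st2.1 ++ [(ch.toNat : Int) - 96], st2.2.1 ++ [(ri, c)], st2.2.2)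
            else (st2.1 ++ [(ch.toNat : Int) - 96], st2.2.1, st2.2.2))
          ([], st.2.1, st.2.2)
        (st.1 ++ [inner.1], inner.2.1, inner.2.2))
      (g, s, e)
    = (g ++ lines.map (fun line => line.toList.map pvHeight),
       s ++ (PySem.List.enumerate lines r).flatMap (fun rl =>
         ((PySem.List.enumerate rl.2.toList).filter (fun cc => cc.2 == 'S' || cc.2 == 'a')).map
           (fun cc => (rl.1, cc.1))),
       ((PySem.List.enumerate lines r).flatMap (fun rl =>
         ((PySem.List.enumerate rl.2.toList).filter (fun cc => cc.2 == 'E')).map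
           (fun cc => (rl.1, cc.1)))).foldl (fun _ p => p) e) := by
  induction lines generalizing r g s e with
  | nil => simp [PySem.List.enumerate_nil]
  | cons line ls ih =>
    rw [PySem.List.enumerate_cons]
    simp only [List.foldl_cons]
    rw [inner_eq, ih]
    simp [List.foldl_append, List.append_assoc, List.flatMap_cons]

-- ===== VERDICT (by name: the statement is the Claim_ definition above) =====
theorem parse_part2_spec : Claim_equal_parse_part2 := by
  intro inpt _
  unfold Spec_parse_part2 parse_part2 parse_part2_alt
  rw [outer_eq, foldl_last]
  simp
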